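-- pv_equiv track=rewrite | github.com/Dev-Soft-source/BookFinder | backend/openai_image_numbers.py | tile_labels_to_click_indexes
-- ===== SOURCE A (Python) =====
-- from typing import Any, Iterable, NamedTuple
--
-- def tile_labels_to_click_indexes(tile_labels: Iterable[Any]) -> list[int]:
--     """Turn model tile NUMBERS (1–9 on buttons) into 0-based ``indexes_to_click`` for Playwright ``.nth(i)``."""
--     indexes: list[int] = []
--     for raw in tile_labels:
--         try:
--             if isinstance(raw, str):
--                 raw = raw.strip()
--             n = int(raw)
--         except (TypeError, ValueError):
--             continue
--         if 1 <= n <= 9: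
--             indexes.append(n - 1)
--     return sorted(set(indexes))
-- ===== SOURCE B (Python) =====
-- def _parse(raw):
--     """Parse one tile label the way int() does (None if not an integer literal)."""
--     try:
--         if isinstance(raw, str):
--             raw = raw.strip()
--         return int(raw)
--     except (TypeError, ValueError):
--         return None
--
--
-- def tile_labels_to_click_indexes(tile_labels):
--     """Turn model tile NUMBERS (1-9 on buttons) into 0-based indexes_to_click.
--
--     Domain-driven: for each button digit d in 1..9, include d-1 iff some label
--     parses to d. Sorted and duplicate-free by construction; no per-label
--     accumulation, no set(), no sorted().
--     """
--     labels = list(tile_labels)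
--     return [d - 1 for d in range(1, 10) if any(_parse(raw) == d for raw in labels)]
-- ===== Notes on version B (the rewrite author's own statement) =====
-- stated objective: alternative
-- what changed: B inverts the traversal: instead of scanning the labels once, collecting hit indexes and then deduplicating with set() and sorting, it iterates over the fixed digit domain 1..9 and includes d-1 iff any label parses to d, so the result is sorted and duplicate-free by construction with no accumulator, set() or sorted().
import Mathlib
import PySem

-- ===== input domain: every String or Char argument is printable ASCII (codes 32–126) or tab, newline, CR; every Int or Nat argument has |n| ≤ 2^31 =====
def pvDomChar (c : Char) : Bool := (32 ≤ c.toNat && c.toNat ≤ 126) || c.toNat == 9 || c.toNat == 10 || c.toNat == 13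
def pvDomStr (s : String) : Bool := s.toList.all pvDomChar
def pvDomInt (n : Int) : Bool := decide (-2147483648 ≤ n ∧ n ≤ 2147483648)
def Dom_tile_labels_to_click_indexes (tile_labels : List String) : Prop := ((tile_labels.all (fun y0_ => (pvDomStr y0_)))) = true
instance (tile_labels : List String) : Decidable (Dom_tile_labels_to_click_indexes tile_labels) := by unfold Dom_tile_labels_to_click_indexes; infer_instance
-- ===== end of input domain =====

-- B inverts the traversal: it scans the fixed digit domain 1..9 and keeps d-1 iff some label
-- parses to d, instead of A's collect-then-dedup-then-sort over the labels (objective: alternative).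


-- ===== PORT A =====
-- A's loop body: raw is a str, so isinstance(raw, str) holds: strip, then int(raw);
-- ValueError → continue; append n-1 when 1 <= n <= 9
def pvStepA (indexes : List Int) (raw : String) : List Int :=
  match PySem.Int.ofStr? (PySem.Str.strip raw) with
  | none => indexes
  | some n => if 1 ≤ n ∧ n ≤ 9 then indexes ++ [n - 1] else indexes

def tile_labels_to_click_indexes (tile_labels : List String) : List Int :=
  PySem.List.sorted (PySem.Set.ofList (tile_labels.foldl pvStepA [])) (fun x => x)

-- ===== PORT B =====
-- B's helper _parse: raw is a str, so isinstance holds: strip then int(); ValueError → None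
def pvParse (raw : String) : Option Int :=
  PySem.Int.ofStr? (PySem.Str.strip raw)

-- [d - 1 for d in range(1, 10) if any(_parse(raw) == d for raw in labels)]
def tile_labels_to_click_indexes_alt (tile_labels : List String) : List Int :=
  ((PySem.List.pyRange 1 10 1).filter
      (fun d => tile_labels.any (fun raw => pvParse raw == some d))).map (fun d => d - 1)

-- ===== PRECONDITION & SPEC =====
def Spec_tile_labels_to_click_indexes (tile_labels : List String) (out : List Int) : Prop := out = tile_labels_to_click_indexes_alt tile_labels
instance (tile_labels : List String) (out : List Int) : Decidable (Spec_tile_labels_to_click_indexes tile_labels out) := by unfold Spec_tile_labels_to_click_indexes; infer_instance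

-- ===== CLAIM =====
def Claim_equal_tile_labels_to_click_indexes : Prop := ∀ (tile_labels : List String), Dom_tile_labels_to_click_indexes tile_labels → Spec_tile_labels_to_click_indexes tile_labels (tile_labels_to_click_indexes tile_labels)

-- ===== LEMMAS AND PROOFS =====

lemma mem_range9 (x : Int) : x ∈ ([0,1,2,3,4,5,6,7,8] : List Int) ↔ 0 ≤ x ∧ x < 9 := by
  constructor
  · intro h; fin_cases h <;> omega
  · rintro ⟨h0, h9⟩; interval_cases x <;> simp

-- membership in A's accumulated index list, characterised over the input labels
lemma memA (tl : List String) :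
    ∀ (acc : List Int) (x : Int),
      x ∈ tl.foldl pvStepA acc ↔
        x ∈ acc ∨ ((0 ≤ x ∧ x < 9) ∧ tl.any (fun raw => pvParse raw == some (x + 1)) = true) := by
  induction tl with
  | nil => intro acc x; simp
  | cons raw tl ih =>
    intro acc x
    simp only [List.foldl_cons, List.any_cons, Bool.or_eq_true, ih]
    unfold pvStepA pvParse
    cases h : PySem.Int.ofStr? (PySem.Str.strip raw) with
    | none => simp
    | some n =>
      dsimp only
      split_ifs with hn
      · constructor
        · rintro (hm | hm)
          · rcases List.mem_append.mp hm with hm | hm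
            · exact Or.inl hm
            · simp at hm
              subst hm
              exact Or.inr ⟨⟨by omega, by omega⟩, Or.inl (by simp)⟩
          · exact Or.inr ⟨hm.1, Or.inr hm.2⟩
        · rintro (hm | ⟨hb, hm | hm⟩)
          · exact Or.inl (List.mem_append.mpr (Or.inl hm))
          · simp at hm
            exact Or.inl (List.mem_append.mpr (Or.inr (by simp; omega)))
          · exact Or.inr ⟨hb, hm⟩
      · constructor
        · rintro (hm | hm)
          · exact Or.inl hm
          · exact Or.inr ⟨hm.1, Or.inr hm.2⟩
        · rintro (hm | ⟨hb, hm | hm⟩)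
          · exact Or.inl hm
          · simp at hm; omega
          · exact Or.inr ⟨hb, hm⟩

-- A's sorted-set result, rewritten as a filter of the fixed domain [0..8]
lemma a_as_filter (acc : List Int) (hbd : ∀ x ∈ acc, 0 ≤ x ∧ x < 9) :
    PySem.List.sorted (PySem.Set.ofList acc) (fun x => x)
      = ([0,1,2,3,4,5,6,7,8] : List Int).filter (fun i => decide (i ∈ acc)) := by
  apply PySem.List.sorted_eq_of_perm_of_pairwise_lt
  · rw [List.perm_ext_iff_of_nodup
      (List.Nodup.filter _ (by decide)) (PySem.Set.nodup_ofList acc)]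
    intro x
    rw [List.mem_filter, PySem.Set.mem_ofList, mem_range9]
    constructor
    · rintro ⟨_, hx⟩; exact of_decide_eq_true hx
    · intro hx; exact ⟨hbd x hx, decide_eq_true hx⟩
  · exact List.Pairwise.filter _ (by decide)

-- shifting the filtered domain: filter after +1-shift, then -1, = filter of the shifted predicate
lemma map_sub_filter (l : List Int) (p : Int → Bool) :
    ((l.map (fun i => i + 1)).filter p).map (fun d => d - 1)
      = l.filter (fun i => p (i + 1)) := by
  induction l with
  | nil => simp
  | cons a l ih =>
    simp only [List.map_cons, List.filter_cons]
    cases p (a + 1) <;> simp [ih]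

-- ===== VERDICT =====
theorem tile_labels_to_click_indexes_spec : Claim_equal_tile_labels_to_click_indexes := by
  intro tl _
  unfold Spec_tile_labels_to_click_indexes tile_labels_to_click_indexes tile_labels_to_click_indexes_alt
  have hbd : ∀ x ∈ tl.foldl pvStepA [], 0 ≤ x ∧ x < 9 := by
    intro x hx
    rcases (memA tl [] x).mp hx with h | h
    · simp at h
    · exact h.1
  rw [a_as_filter _ hbd]
  have hr : PySem.List.pyRange 1 10 1
      = (([0,1,2,3,4,5,6,7,8] : List Int).map (fun i => i + 1)) := by decide
  rw [hr, map_sub_filter]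
  apply List.filter_congr
  intro i hi
  have hib := (mem_range9 i).mp hi
  rw [Bool.eq_iff_iff]
  simp only [decide_eq_true_eq]
  rw [memA tl [] i]
  simp [hib]
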